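-- pv_equiv track=rewrite | github.com/Navinde/PythonProblemSolvingCodeSubmission | ps2_hangman.py | GuessedLetter
-- ===== SOURCE A (Python) =====
-- def GuessedLetter(secretWord, lettersGuessed):
--
--     s=[]
--     for i in secretWord:
--         if i in lettersGuessed:
--             s.append(i)
--     ans=''
--     for i in secretWord:
--         if i in s:
--             ans+=i
--         else:
--             ans+='_ '
--     return ans
-- ===== SOURCE B (Python) =====
-- def GuessedLetter(secretWord, lettersGuessed):
--     # Guess-major: maintain a boolean reveal mask over positions,
--     # update it once per guessed letter, then render the mask.
--     revealed = [False] * len(secretWord)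
--     for g in lettersGuessed:
--         revealed = [r or ch == g for r, ch in zip(revealed, secretWord)]
--     return ''.join(ch if r else '_ ' for ch, r in zip(secretWord, revealed))
-- ===== Notes on version B (the rewrite author's own statement) =====
-- stated objective: alternative
-- what changed: A is char-major (build the matched-letter list s, then rescan secretWord testing membership); B is guess-major: it keeps a boolean reveal mask over positions, sweeps once over lettersGuessed updating the mask by zipping it with secretWord, then renders the mask.
import Mathlib
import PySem

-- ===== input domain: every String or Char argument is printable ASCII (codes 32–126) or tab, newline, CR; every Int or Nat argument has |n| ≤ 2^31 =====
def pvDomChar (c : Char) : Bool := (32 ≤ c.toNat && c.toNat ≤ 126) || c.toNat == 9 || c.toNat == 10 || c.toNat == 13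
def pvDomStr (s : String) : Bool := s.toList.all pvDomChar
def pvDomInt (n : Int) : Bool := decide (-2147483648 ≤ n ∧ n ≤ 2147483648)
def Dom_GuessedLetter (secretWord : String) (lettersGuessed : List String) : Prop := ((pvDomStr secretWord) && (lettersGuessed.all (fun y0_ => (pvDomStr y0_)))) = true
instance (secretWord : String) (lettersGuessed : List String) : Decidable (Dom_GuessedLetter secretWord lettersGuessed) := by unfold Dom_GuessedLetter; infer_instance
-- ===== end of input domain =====

-- B replaces A's char-major two-pass scan with a guess-major sweep over lettersGuessed
-- maintaining a boolean reveal mask over positions; objective: alternative.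

-- ===== PORT A =====
-- A: first loop collects into s the characters of secretWord that occur in lettersGuessed
-- (each character of a Python string is a 1-char string, hence String.mk [i] ∈ lettersGuessed);
-- second loop rebuilds ans testing membership in s; ans kept as List Char, wrapped by
-- String.mk at the end (exact: Python string concatenation of these pieces).
def GuessedLetter (secretWord : String) (lettersGuessed : List String) : String :=
  let s : List Char :=
    secretWord.toList.foldl
      (fun s i => if String.mk [i] ∈ lettersGuessed then s ++ [i] else s) []
  String.mk
    (secretWord.toList.foldl
      (fun ans i => if i ∈ s then ans ++ [i] else ans ++ ['_', ' ']) [])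

-- ===== PORT B =====
-- B: revealed = [False]*len(secretWord); for each guess g, revealed is rebuilt by
-- zipping with secretWord ('r or ch == g'); finally ''.join renders the mask
-- (the join of the 1-char / '_ ' pieces is ported exactly as the flatMap of their chars).
def GuessedLetter_alt (secretWord : String) (lettersGuessed : List String) : String :=
  let revealed : List Bool := List.replicate secretWord.toList.length false
  let revealed :=
    lettersGuessed.foldl
      (fun revealed g =>
        (revealed.zip secretWord.toList).map (fun p => p.1 || decide (String.mk [p.2] = g)))
      revealed
  String.mk
    ((secretWord.toList.zip revealed).flatMap
      (fun p => if p.2 then [p.1] else ['_', ' ']))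

-- ===== PRECONDITION & SPEC =====
def Spec_GuessedLetter (secretWord : String) (lettersGuessed : List String) (out : String) : Prop := out = GuessedLetter_alt secretWord lettersGuessed
instance (secretWord : String) (lettersGuessed : List String) (out : String) : Decidable (Spec_GuessedLetter secretWord lettersGuessed out) := by unfold Spec_GuessedLetter; infer_instance

-- ===== CLAIM =====
def Claim_equal_GuessedLetter : Prop := ∀ (secretWord : String) (lettersGuessed : List String), Dom_GuessedLetter secretWord lettersGuessed → Spec_GuessedLetter secretWord lettersGuessed (GuessedLetter secretWord lettersGuessed)

-- ===== LEMMAS AND PROOFS =====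

-- A's first loop is a filter.
theorem pv_loop1_filter (lg : List String) :
    ∀ (l acc : List Char),
      l.foldl (fun s i => if String.mk [i] ∈ lg then s ++ [i] else s) acc
        = acc ++ l.filter (fun i => decide (String.mk [i] ∈ lg)) := by
  intro l
  induction l with
  | nil => intro acc; simp
  | cons x xs ih =>
    intro acc
    by_cases h : String.mk [x] ∈ lg <;> simp [List.foldl, h, ih]

-- A's second loop, for any membership test that agrees with p on the elements of l,
-- appends to acc the flatMap of the reveal pieces.
theorem pv_loop2_flatMap (p : Char → Prop) [DecidablePred p] (s : List Char) :
    ∀ (l acc : List Char), (∀ i ∈ l, (i ∈ s ↔ p i)) →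
      l.foldl (fun ans i => if i ∈ s then ans ++ [i] else ans ++ ['_', ' ']) acc
        = acc ++ l.flatMap (fun c => if p c then [c] else ['_', ' ']) := by
  intro l
  induction l with
  | nil => intro acc _; simp
  | cons x xs ih =>
    intro acc h
    have hx : (x ∈ s) ↔ p x := h x (by simp)
    by_cases hp : p x
    · simp [List.foldl, hx, hp, ih _ (fun i hi => h i (by simp [hi]))]
    · simp [List.foldl, hx, hp, ih _ (fun i hi => h i (by simp [hi]))]

-- zipping a pointwise map of l with l is a map over l.
theorem pv_zip_map_self {α β : Type} (f : α → β) :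
    ∀ (l : List α), (l.map f).zip l = l.map (fun c => (f c, c)) := by
  intro l
  induction l with
  | nil => rfl
  | cons x xs ih => simp only [List.zip] at ih ⊢; simp [ih]

theorem pv_zip_self_map {α β : Type} (f : α → β) :
    ∀ (l : List α), l.zip (l.map f) = l.map (fun c => (c, f c)) := by
  intro l
  induction l with
  | nil => rfl
  | cons x xs ih => simp only [List.zip] at ih ⊢; simp [ih]

-- B's guess-major fold keeps the mask as a pointwise map of secretWord's characters.
theorem pv_mask_char (l : List Char) :
    ∀ (gs : List String) (f : Char → Bool),
      gs.foldl
        (fun revealed g =>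
          (revealed.zip l).map (fun p => p.1 || decide (String.mk [p.2] = g)))
        (l.map f)
      = l.map (fun c => f c || gs.any (fun g => decide (String.mk [c] = g))) := by
  intro gs
  induction gs with
  | nil => intro f; simp
  | cons g gs ih =>
    intro f
    simp only [List.foldl, pv_zip_map_self, List.map_map, Function.comp_def]
    rw [ih (fun c => f c || decide (String.mk [c] = g))]
    simp [Bool.or_assoc]

theorem pv_any_eq_mem (gs : List String) (x : String) :
    gs.any (fun g => decide (x = g)) = decide (x ∈ gs) := by
  induction gs with
  | nil => simp
  | cons g gs ih => by_cases h : x = g <;> simp [List.any, h, ih]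

-- ===== VERDICT =====
theorem GuessedLetter_spec : Claim_equal_GuessedLetter := by
  intro secretWord lettersGuessed _
  unfold Spec_GuessedLetter
  simp only [GuessedLetter, GuessedLetter_alt]
  rw [pv_loop1_filter lettersGuessed secretWord.toList []]
  rw [pv_loop2_flatMap (fun c => String.mk [c] ∈ lettersGuessed) _ secretWord.toList []
    (by intro i hi; simp [List.mem_filter, hi])]
  have hrep : List.replicate secretWord.toList.length false
      = secretWord.toList.map (fun _ => false) := by
    simp [List.map_const']
  rw [hrep, pv_mask_char, pv_zip_self_map]
  simp [pv_any_eq_mem, List.flatMap_map]
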